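-- pv_equiv track=rewrite | github.com/bofenghuang/transformers | examples/pytorch/token-classification/utils/dataset_ner_case_punkt.py | align_sequence_label
-- ===== SOURCE A (Python) =====
-- def align_sequence_label(word_ids, sequence_label, label_to_id, label_strategy="all"):
--     previous_word_idx = None
--     new_sequence_label = []
--     for word_idx in word_ids:
--         # Special tokens have a word id that is None. We set the label to -100 so they are automatically
--         # ignored in the loss function.
--         if word_idx is None:
--             new_sequence_label.append(-100)
--         else:
--             if label_strategy == "first":
--                 if word_idx != previous_word_idx:
--                     new_sequence_label.append(label_to_id[sequence_label[word_idx]])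
--                 else:
--                     new_sequence_label.append(-100)
--             elif label_strategy == "last":
--                 if word_idx == previous_word_idx:
--                     new_sequence_label[-1] = -100
--                 new_sequence_label.append(label_to_id[sequence_label[word_idx]])
--             elif label_strategy == "all":
--                 new_sequence_label.append(label_to_id[sequence_label[word_idx]])
--                 # todo: differenci beginning label and others
--                 # if word_idx != previous_word_idx:
--                 #     new_sequence_label.append(label_to_id[sequence_label[word_idx]])
--                 # else:
--                 #     new_sequence_label.append(b_to_i_label[label_to_id[sequence_label[word_idx]]])
--             else:
--                 raise ValueError("Invalid labeling strategy")
--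
--         previous_word_idx = word_idx
--
--     return new_sequence_label
-- ===== SOURCE B (Python) =====
-- def align_sequence_label(word_ids, sequence_label, label_to_id, label_strategy="all"):
--     def relevant(w, prev, nxt):
--         if label_strategy == "all":
--             return True
--         if label_strategy == "first":
--             return w != prev
--         if label_strategy == "last":
--             return w != nxt
--         raise ValueError("Invalid labeling strategy")
--
--     prevs = [None] + word_ids[:-1]
--     nexts = word_ids[1:] + [None]
--     return [
--         -100 if w is None or not relevant(w, p, n) else label_to_id[sequence_label[w]]
--         for w, p, n in zip(word_ids, prevs, nexts)
--     ]
-- ===== Notes on version B (the rewrite author's own statement) =====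
-- stated objective: alternative
-- what changed: B is a single stateless comprehension over word_ids zipped with its neighbor-shifted copies, with a 'relevant' predicate per strategy ('last' compares with the next word_id instead of A's append-then-back-patch mutation of the previous entry; 'first' compares with the previous one instead of carrying loop state).
import Mathlib
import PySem

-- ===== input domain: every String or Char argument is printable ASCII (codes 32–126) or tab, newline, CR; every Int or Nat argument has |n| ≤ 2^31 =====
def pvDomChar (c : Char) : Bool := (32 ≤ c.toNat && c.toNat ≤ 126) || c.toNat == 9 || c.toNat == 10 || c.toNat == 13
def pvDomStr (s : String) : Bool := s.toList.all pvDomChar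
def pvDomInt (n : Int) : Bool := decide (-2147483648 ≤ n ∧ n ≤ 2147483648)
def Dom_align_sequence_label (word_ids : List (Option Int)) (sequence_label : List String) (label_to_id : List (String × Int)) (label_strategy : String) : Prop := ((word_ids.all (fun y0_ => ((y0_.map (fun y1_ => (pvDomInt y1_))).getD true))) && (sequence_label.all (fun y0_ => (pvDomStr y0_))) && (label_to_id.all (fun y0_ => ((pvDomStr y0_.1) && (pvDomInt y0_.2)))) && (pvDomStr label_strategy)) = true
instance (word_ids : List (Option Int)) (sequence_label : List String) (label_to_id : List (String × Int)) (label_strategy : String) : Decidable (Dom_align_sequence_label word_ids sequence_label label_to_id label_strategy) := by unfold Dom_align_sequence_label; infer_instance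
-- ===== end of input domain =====

-- B replaces A's stateful loop with one stateless comprehension over word_ids zipped with its
-- neighbor-shifted copies ('last' looks at the next id instead of back-patching the previous entry);
-- A = B is proved on Pre_ (the inputs where both Pythons return).


-- label_to_id[sequence_label[i]]  (shared lookup expression of both Pythons);
-- defaults are never reached inside Pre_ (IndexError/KeyError are excluded there)
def pvLab (sequence_label : List String) (label_to_id : List (String × Int)) (i : Int) : Int :=
  match PySem.List.pyGet? sequence_label i with
  | none => 0
  | some s => ((PySem.Dict.mk label_to_id).get? s).getD 0

-- ===== PORT A =====
-- A's loop: state = (previous_word_idx, new_sequence_label); 'new_sequence_label[-1] = -100'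
-- is acc.dropLast ++ [-100] (exact: when taken, prev = some i so acc is nonempty in Python too)
def pvGoA (sequence_label : List String) (label_to_id : List (String × Int)) (label_strategy : String) : Option Int → List Int → List (Option Int) → List Int
  | _, acc, [] => acc
  | prev, acc, w :: rest =>
    match w with
    | none => pvGoA sequence_label label_to_id label_strategy w (acc ++ [-100]) rest
    | some i =>
      if label_strategy = "first" then
        pvGoA sequence_label label_to_id label_strategy w
          (acc ++ [if w ≠ prev then pvLab sequence_label label_to_id i else -100]) rest
      else if label_strategy = "last" then
        pvGoA sequence_label label_to_id label_strategy w
          ((if w = prev then acc.dropLast ++ [-100] else acc) ++ [pvLab sequence_label label_to_id i]) rest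
      else if label_strategy = "all" then
        pvGoA sequence_label label_to_id label_strategy w
          (acc ++ [pvLab sequence_label label_to_id i]) rest
      else
        acc  -- raise ValueError("Invalid labeling strategy"): excluded by Pre_

def align_sequence_label (word_ids : List (Option Int)) (sequence_label : List String) (label_to_id : List (String × Int)) (label_strategy : String) : List Int :=
  pvGoA sequence_label label_to_id label_strategy none [] word_ids

-- ===== PORT B =====
-- B's 'relevant(w, prev, nxt)' helper; the final branch is Python's
-- raise ValueError("Invalid labeling strategy"), excluded by Pre_
def pvRelevant (label_strategy : String) (w prev nxt : Option Int) : Bool :=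
  if label_strategy = "all" then true
  else if label_strategy = "first" then w != prev
  else if label_strategy = "last" then w != nxt
  else false

-- zip(word_ids, [None] + word_ids[:-1], word_ids[1:] + [None]) and the comprehension body
def align_sequence_label_alt (word_ids : List (Option Int)) (sequence_label : List String) (label_to_id : List (String × Int)) (label_strategy : String) : List Int :=
  (word_ids.zip ((none :: word_ids.dropLast).zip (word_ids.drop 1 ++ [none]))).map
    (fun x => match x.1 with
      | none => -100
      | some k =>
        if pvRelevant label_strategy x.1 x.2.1 x.2.2 then pvLab sequence_label label_to_id k
        else -100)

-- ===== PRECONDITION & SPEC =====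
-- Pre_ = exactly the inputs on which BOTH Pythons return: every non-None word id indexes
-- sequence_label (Python semantics), its label is a key of label_to_id, and whenever a
-- non-None id occurs the strategy is one of "first"/"last"/"all" (both A and B raise the
-- ValueError only upon reaching a real token).
def pvPreOk (sequence_label : List String) (label_to_id : List (String × Int)) (label_strategy : String) (o : Option Int) : Bool :=
  match o with
  | none => true
  | some i =>
    (label_strategy == "first" || label_strategy == "last" || label_strategy == "all") &&
    (match PySem.List.pyGet? sequence_label i with
     | none => false
     | some s => ((PySem.Dict.mk label_to_id).get? s).isSome)

def Pre_align_sequence_label (word_ids : List (Option Int)) (sequence_label : List String) (label_to_id : List (String × Int)) (label_strategy : String) : Prop :=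
  ∀ o ∈ word_ids, pvPreOk sequence_label label_to_id label_strategy o = true
instance (word_ids : List (Option Int)) (sequence_label : List String) (label_to_id : List (String × Int)) (label_strategy : String) : Decidable (Pre_align_sequence_label word_ids sequence_label label_to_id label_strategy) := by unfold Pre_align_sequence_label; infer_instance

def pvWitness_align_sequence_label : List (Option Int) × List String × (List (String × Int)) × String :=
  ([some 0, some 0, none, some 1], ["B-X", "O"], [("B-X", 1), ("O", 0)], "last")

def Spec_align_sequence_label (word_ids : List (Option Int)) (sequence_label : List String) (label_to_id : List (String × Int)) (label_strategy : String) (out : List Int) : Prop := out = align_sequence_label_alt word_ids sequence_label label_to_id label_strategy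
instance (word_ids : List (Option Int)) (sequence_label : List String) (label_to_id : List (String × Int)) (label_strategy : String) (out : List Int) : Decidable (Spec_align_sequence_label word_ids sequence_label label_to_id label_strategy out) := by unfold Spec_align_sequence_label; infer_instance

-- ===== CLAIM (what is proved, stated in full; the proofs are below) =====
def Claim_equal_align_sequence_label : Prop := ∀ (word_ids : List (Option Int)) (sequence_label : List String) (label_to_id : List (String × Int)) (label_strategy : String), Dom_align_sequence_label word_ids sequence_label label_to_id label_strategy → Pre_align_sequence_label word_ids sequence_label label_to_id label_strategy → Spec_align_sequence_label word_ids sequence_label label_to_id label_strategy (align_sequence_label word_ids sequence_label label_to_id label_strategy)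

-- ===== LEMMAS AND PROOFS =====

theorem pvWitness_ok :
    Dom_align_sequence_label pvWitness_align_sequence_label.1 pvWitness_align_sequence_label.2.1 pvWitness_align_sequence_label.2.2.1 pvWitness_align_sequence_label.2.2.2 ∧
    Pre_align_sequence_label pvWitness_align_sequence_label.1 pvWitness_align_sequence_label.2.1 pvWitness_align_sequence_label.2.2.1 pvWitness_align_sequence_label.2.2.2 := by
  decide

-- recursive reading of B's zipped comprehension: prev is carried, nxt = rest.head? (padded none)
def pvBody (strat : String) (sl : List String) (l2i : List (String × Int)) : Option Int → List (Option Int) → List Int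
  | _, [] => []
  | prev, w :: rest =>
    (match w with
     | none => -100
     | some k =>
       if pvRelevant strat w prev (rest.head?.getD none) then pvLab sl l2i k else -100)
      :: pvBody strat sl l2i w rest

theorem alt_eq_body (wi : List (Option Int)) (sl : List String) (l2i : List (String × Int)) (strat : String) :
    align_sequence_label_alt wi sl l2i strat = pvBody strat sl l2i none wi := by
  unfold align_sequence_label_alt
  suffices h : ∀ (ws : List (Option Int)) (prev : Option Int),
      (ws.zip ((prev :: ws.dropLast).zip (ws.drop 1 ++ [none]))).map
        (fun x => match x.1 with
          | none => -100
          | some k =>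
            if pvRelevant strat x.1 x.2.1 x.2.2 then pvLab sl l2i k else -100)
        = pvBody strat sl l2i prev ws from h wi none
  intro ws
  induction ws with
  | nil => intro prev; simp [pvBody]
  | cons w rest ih =>
    intro prev
    cases rest with
    | nil => cases w <;> simp [pvBody]
    | cons r rs =>
      have := ih w
      cases w <;> simp_all [pvBody, List.dropLast]

theorem goA_all (sl : List String) (l2i : List (String × Int)) :
    ∀ (ws : List (Option Int)) (prev : Option Int) (acc : List Int),
      pvGoA sl l2i "all" prev acc ws = acc ++ pvBody "all" sl l2i prev ws := by
  intro ws
  induction ws with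
  | nil => intro prev acc; simp [pvGoA, pvBody]
  | cons w rest ih =>
    intro prev acc
    match w with
    | none => simp [pvGoA, pvBody, ih]
    | some i => simp [pvGoA, pvBody, pvRelevant, ih]

theorem goA_first (sl : List String) (l2i : List (String × Int)) :
    ∀ (ws : List (Option Int)) (prev : Option Int) (acc : List Int),
      pvGoA sl l2i "first" prev acc ws = acc ++ pvBody "first" sl l2i prev ws := by
  intro ws
  induction ws with
  | nil => intro prev acc; simp [pvGoA, pvBody]
  | cons w rest ih =>
    intro prev acc
    match w with
    | none => simp [pvGoA, pvBody, ih]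
    | some i =>
      by_cases h : (some i : Option Int) = prev <;>
        simp [pvGoA, pvBody, pvRelevant, ih, h]

def pvPatch (ws : List (Option Int)) (prev : Option Int) : Bool :=
  match ws, prev with
  | some i :: _, some j => decide (i = j)
  | _, _ => false

theorem pvPatch_none_right (ws : List (Option Int)) : pvPatch ws none = false := by
  cases ws with
  | nil => rfl
  | cons w rest => cases w <;> rfl

theorem pvPatch_none_head (rest : List (Option Int)) (prev : Option Int) :
    pvPatch (none :: rest) prev = false := by cases prev <;> rfl

theorem pvPatch_some (i : Int) (rest : List (Option Int)) (prev : Option Int) :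
    pvPatch (some i :: rest) prev = decide (some i = prev) := by
  cases prev <;> simp [pvPatch]

set_option maxRecDepth 4096 in
theorem goA_last (sl : List String) (l2i : List (String × Int)) :
    ∀ (ws : List (Option Int)) (prev : Option Int) (acc : List Int),
      pvGoA sl l2i "last" prev acc ws =
        (if pvPatch ws prev then acc.dropLast ++ [-100] else acc) ++ pvBody "last" sl l2i prev ws := by
  intro ws
  induction ws with
  | nil => intro prev acc; simp [pvGoA, pvBody, pvPatch]
  | cons w rest ih =>
    intro prev acc
    match w with
    | none =>
      simp [pvGoA, pvBody, ih, pvPatch_none_head, pvPatch_none_right]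
    | some i =>
      have hrel : pvRelevant "last" (some i) prev (rest.head?.getD none)
          = !(pvPatch rest (some i)) := by
        cases rest with
        | nil => simp [pvRelevant, pvPatch]
        | cons r rs => cases r with
          | none => simp [pvRelevant, pvPatch]
          | some k =>
            by_cases h : k = i
            · simp [pvRelevant, pvPatch, h]
            · have h' : ¬ (i = k) := fun hh => h hh.symm
              simp [pvRelevant, pvPatch, h, h']
      have hstep : pvGoA sl l2i "last" prev acc (some i :: rest)
          = pvGoA sl l2i "last" (some i)
              ((if (some i : Option Int) = prev then acc.dropLast ++ [-100] else acc)
                ++ [pvLab sl l2i i]) rest := by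
        simp [pvGoA]
      rw [hstep, ih, pvBody, hrel, pvPatch_some]
      by_cases h2 : pvPatch rest (some i) = true <;> simp [h2]

theorem goA_allnone (sl : List String) (l2i : List (String × Int)) (strat : String) :
    ∀ (ws : List (Option Int)), (∀ o ∈ ws, o = none) →
      ∀ (prev : Option Int) (acc : List Int),
        pvGoA sl l2i strat prev acc ws = acc ++ pvBody strat sl l2i prev ws := by
  intro ws
  induction ws with
  | nil => intro _ prev acc; simp [pvGoA, pvBody]
  | cons w rest ih =>
    intro h prev acc
    have hw : w = none := h w (by simp)
    subst hw
    simp [pvGoA, pvBody, ih (fun o ho => h o (by simp [ho]))]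

-- ===== VERDICT (by name: the statement is the Claim_ definition above) =====
theorem align_sequence_label_spec : Claim_equal_align_sequence_label := by
  intro wi sl l2i strat _ hpre
  unfold Spec_align_sequence_label align_sequence_label
  rw [alt_eq_body]
  by_cases hall : strat = "all"
  · subst hall; simp [goA_all]
  · by_cases hfst : strat = "first"
    · subst hfst; simp [goA_first]
    · by_cases hlst : strat = "last"
      · subst hlst; simp [goA_last, pvPatch_none_right]
      · have hnone : ∀ o ∈ wi, o = none := by
          intro o ho
          cases o with
          | none => rfl
          | some i =>
            have := hpre _ ho
            simp [pvPreOk, hall, hfst, hlst] at this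
        simp [goA_allnone sl l2i strat wi hnone]
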